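-- pv_equiv track=rewrite | github.com/MounaKallu/Language-Classification | LanguageClassificaiton.py | find_true_false_ada
-- ===== SOURCE A (Python) =====
-- def find_true_false_ada(features, col):
--     true_rows = []
--     false_rows = []
--     correct_vals = dict()
--     incorrect_vals = dict()
--     for row in features:
--         if row[col] == "True":
--             true_rows.append(row)
--         else:
--             false_rows.append(row)
--     for line in true_rows:
--         if line[-2] not in correct_vals.keys():
--             correct_vals[line[-2]] = list()
--         correct_vals[line[-2]].append(line)
--     for line in false_rows:
--         if line[-2] not in incorrect_vals.keys():
--             incorrect_vals[line[-2]] = list()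
--         incorrect_vals[line[-2]].append(line)
--     return correct_vals, incorrect_vals
-- ===== SOURCE B (Python) =====
-- def find_true_false_ada(features, col):
--     correct_vals = {}
--     incorrect_vals = {}
--     for row in features:
--         target = correct_vals if row[col] == "True" else incorrect_vals
--         target.setdefault(row[-2], []).append(row)
--     return correct_vals, incorrect_vals
-- ===== Notes on version B (the rewrite author's own statement) =====
-- stated objective: simpler
-- what changed: Replaces A's three sequential loops and the intermediate true_rows/false_rows lists with a single pass over features that picks the target dict per row and groups immediately via setdefault.
import Mathlib
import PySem

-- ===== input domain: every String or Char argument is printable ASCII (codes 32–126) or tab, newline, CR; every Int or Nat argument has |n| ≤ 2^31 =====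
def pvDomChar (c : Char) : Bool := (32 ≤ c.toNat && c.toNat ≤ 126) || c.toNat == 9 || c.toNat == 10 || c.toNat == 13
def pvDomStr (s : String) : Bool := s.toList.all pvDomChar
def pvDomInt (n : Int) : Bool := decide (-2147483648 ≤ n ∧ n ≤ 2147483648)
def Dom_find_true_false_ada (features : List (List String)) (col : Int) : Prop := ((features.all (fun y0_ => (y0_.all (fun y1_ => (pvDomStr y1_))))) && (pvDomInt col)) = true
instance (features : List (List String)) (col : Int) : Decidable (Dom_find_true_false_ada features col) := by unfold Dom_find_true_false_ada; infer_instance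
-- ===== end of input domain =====

-- B replaces A's three sequential loops (split, then group each half) by ONE pass over
-- features that groups each row into the chosen dict immediately (simpler decomposition).
-- A mutates nothing; equivalence is about the return value.


-- ===== PORT A =====
-- row[col] / line[-2] are ported with PySem.List.pyGetD; exact under Pre_ (index in range, row length ≥ 2).
def find_true_false_ada (features : List (List String)) (col : Int) :
    (List (String × List (List String))) × (List (String × List (List String))) :=
  let tf := features.foldl
    (fun (acc : List (List String) × List (List String)) row =>
      if PySem.List.pyGetD row col "" = "True" then (acc.1 ++ [row], acc.2)
      else (acc.1, acc.2 ++ [row]))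
    ([], [])
  let correct_vals := tf.1.foldl
    (fun (d : PySem.Dict String (List (List String))) line =>
      let k := PySem.List.pyGetD line (-2) ""
      let d := if d.contains k = false then d.insert k [] else d
      d.insert k (d.getD k [] ++ [line]))
    PySem.Dict.empty
  let incorrect_vals := tf.2.foldl
    (fun (d : PySem.Dict String (List (List String))) line =>
      let k := PySem.List.pyGetD line (-2) ""
      let d := if d.contains k = false then d.insert k [] else d
      d.insert k (d.getD k [] ++ [line]))
    PySem.Dict.empty
  (correct_vals.items, incorrect_vals.items)

-- ===== PORT B =====
-- setdefault(row[-2], []).append(row) is ported as Dict.modify (d[k] = d.get(k, []) ++ [row]).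
def find_true_false_ada_alt (features : List (List String)) (col : Int) :
    (List (String × List (List String))) × (List (String × List (List String))) :=
  let ci := features.foldl
    (fun (acc : PySem.Dict String (List (List String)) × PySem.Dict String (List (List String))) row =>
      let k := PySem.List.pyGetD row (-2) ""
      if PySem.List.pyGetD row col "" = "True" then (acc.1.modify k [] (· ++ [row]), acc.2)
      else (acc.1, acc.2.modify k [] (· ++ [row])))
    (PySem.Dict.empty, PySem.Dict.empty)
  (ci.1.items, ci.2.items)

-- ===== PRECONDITION & SPEC =====
-- Pre_: Python A raises IndexError when some row[col] or row[-2] is out of range; exactly those inputs are excluded.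
def Pre_find_true_false_ada (features : List (List String)) (col : Int) : Prop :=
  ∀ row ∈ features, PySem.Raise.InRange row.length col ∧ 2 ≤ row.length
instance (features : List (List String)) (col : Int) : Decidable (Pre_find_true_false_ada features col) := by unfold Pre_find_true_false_ada; infer_instance
def pvWitness_find_true_false_ada : List (List String) × Int :=
  ([["True", "a", "x"], ["False", "a", "y"], ["True", "b", "z"]], 0)
def Spec_find_true_false_ada (features : List (List String)) (col : Int) (out : (List (String × List (List String))) × (List (String × List (List String)))) : Prop := out = find_true_false_ada_alt features col
instance (features : List (List String)) (col : Int) (out : (List (String × List (List String))) × (List (String × List (List String)))) : Decidable (Spec_find_true_false_ada features col out) := by unfold Spec_find_true_false_ada; infer_instance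

-- ===== CLAIM (what is proved, stated in full; the proofs are below) =====
def Claim_equal_find_true_false_ada : Prop := ∀ (features : List (List String)) (col : Int), Dom_find_true_false_ada features col → Pre_find_true_false_ada features col → Spec_find_true_false_ada features col (find_true_false_ada features col)

-- ===== LEMMAS AND PROOFS =====

-- A's "ensure key, then overwrite" grouping step equals B's Dict.modify step.
theorem ada_step_eq_modify (d : PySem.Dict String (List (List String))) (k : String)
    (line : List String) :
    (let d' := if d.contains k = false then d.insert k [] else d;
      d'.insert k (d'.getD k [] ++ [line])) = d.modify k [] (· ++ [line]) := by
  show (if d.contains k = false then d.insert k [] else d).insert k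
      ((if d.contains k = false then d.insert k [] else d).getD k [] ++ [line]) =
    d.insert k (d.getD k [] ++ [line])
  by_cases h : d.contains k = false
  · simp only [h, if_pos, PySem.Dict.getD_insert_self,
      PySem.Dict.getD_of_not_contains d ([] : List (List String)) h, List.nil_append]
    apply PySem.Dict.ext
    rw [PySem.Dict.items_insert_of_contains _ _ (PySem.Dict.contains_insert_self d k []),
      PySem.Dict.items_insert_of_not_contains _ _ h,
      PySem.Dict.items_insert_of_not_contains _ _ h]
    rw [List.map_append]
    congr 1
    · refine (List.map_congr_left ?_).trans (List.map_id _)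
      intro p hp
      have hpk : (p.1 == k) = false := by
        by_contra hne
        have : d.contains k = true := by
          unfold PySem.Dict.contains
          exact List.any_eq_true.mpr ⟨p, hp, by simpa using hne⟩
        simp [this] at h
      simp [hpk]
    · simp
  · simp [h]

-- B's one pass over features splits into A's two grouping folds over the filtered halves.
theorem ada_fold_split (col : Int) (l : List (List String))
    (c i : PySem.Dict String (List (List String))) :
    l.foldl
      (fun acc row =>
        let k := PySem.List.pyGetD row (-2) ""
        if PySem.List.pyGetD row col "" = "True" then (acc.1.modify k [] (· ++ [row]), acc.2)
        else (acc.1, acc.2.modify k [] (· ++ [row])))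
      (c, i) =
    ((l.filter (fun row => decide (PySem.List.pyGetD row col "" = "True"))).foldl
        (fun d line => d.modify (PySem.List.pyGetD line (-2) "") [] (· ++ [line])) c,
      (l.filter (fun row => decide ¬(PySem.List.pyGetD row col "" = "True"))).foldl
        (fun d line => d.modify (PySem.List.pyGetD line (-2) "") [] (· ++ [line])) i) := by
  induction l generalizing c i with
  | nil => rfl
  | cons row rest ih =>
    by_cases h : PySem.List.pyGetD row col "" = "True" <;>
      simp [h, ih]

-- A's splitting pair-fold produces exactly the two filtered halves.
theorem ada_split_fold (col : Int) (l : List (List String))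
    (t f : List (List String)) :
    l.foldl
      (fun (acc : List (List String) × List (List String)) row =>
        if PySem.List.pyGetD row col "" = "True" then (acc.1 ++ [row], acc.2) else (acc.1, acc.2 ++ [row]))
      (t, f) =
    (t ++ l.filter (fun row => decide (PySem.List.pyGetD row col "" = "True")),
      f ++ l.filter (fun row => decide ¬(PySem.List.pyGetD row col "" = "True"))) := by
  induction l generalizing t f with
  | nil => simp
  | cons row rest ih =>
    by_cases h : PySem.List.pyGetD row col "" = "True" <;>
      simp [h, ih]

-- ===== VERDICT (by name: the statement is the Claim_ definition above) =====
theorem find_true_false_ada_spec : Claim_equal_find_true_false_ada := by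
  intro features col _ _
  unfold Spec_find_true_false_ada find_true_false_ada find_true_false_ada_alt
  rw [ada_fold_split col features PySem.Dict.empty PySem.Dict.empty,
    ada_split_fold col features [] []]
  simp only [List.nil_append]
  have hf : (fun (d : PySem.Dict String (List (List String))) (line : List String) =>
      let k := PySem.List.pyGetD line (-2) ""
      let d' := if d.contains k = false then d.insert k [] else d
      d'.insert k (d'.getD k [] ++ [line])) =
      (fun d line => d.modify (PySem.List.pyGetD line (-2) "") [] (· ++ [line])) :=
    funext fun d => funext fun line => ada_step_eq_modify d _ line
  rw [hf]
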